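-- pv_equiv track=rewrite | github.com/janmichael88/Leetcode_Monthly_Challenges | 2025_Challenges/Apr_2025.py | solve
-- ===== SOURCE A (Python) =====
-- def solve(arr,minK,maxK):
--     #need to store the leftmost and rightmost min
--     #also need to store the leftmost and rightmost max
--     #store the indices for min and max
--     n = len(arr)
--     min_idxs = []
--     max_idxs = []
--     for i,num in enumerate(arr):
--         if num == minK:
--             min_idxs.append(i)
--         if num == maxK:
--             max_idxs.append(i)
--     if minK == maxK:
--         k = len(min_idxs)
--         return k*(k+1) //2
--     count = 0
--     for i in min_idxs:
--         for j in max_idxs: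
--             left = min(i,j)
--             right = max(i,j)
--             count += (left+1)*(n - right)
--     return count
-- ===== SOURCE B (Python) =====
-- def solve(arr, minK, maxK):
--     # One pass with running prefix aggregates instead of the nested pair loop.
--     n = len(arr)
--     if minK == maxK:
--         k = arr.count(minK)
--         return k * (k + 1) // 2
--     total_nj = sum(n - j for j, v in enumerate(arr) if v == maxK)
--     seen_j1 = 0   # sum of (j+1) over maxK positions seen so far
--     seen_nj = 0   # sum of (n-j) over maxK positions seen so far
--     count = 0
--     for i, v in enumerate(arr):
--         if v == maxK:
--             seen_j1 += i + 1
--             seen_nj += n - i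
--         elif v == minK:
--             count += (n - i) * seen_j1 + (i + 1) * (total_nj - seen_nj)
--     return count
-- ===== Notes on version B (the rewrite author's own statement) =====
-- stated objective: alternative
-- what changed: Replaces A's nested loop over all (min-index, max-index) pairs by a single left-to-right pass keeping running prefix sums of (j+1) and (n-j) over maxK positions plus a precomputed total, handling each minK position in O(1); asymptotically better in the worst case but not measurably faster on the timing inputs.
import Mathlib
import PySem

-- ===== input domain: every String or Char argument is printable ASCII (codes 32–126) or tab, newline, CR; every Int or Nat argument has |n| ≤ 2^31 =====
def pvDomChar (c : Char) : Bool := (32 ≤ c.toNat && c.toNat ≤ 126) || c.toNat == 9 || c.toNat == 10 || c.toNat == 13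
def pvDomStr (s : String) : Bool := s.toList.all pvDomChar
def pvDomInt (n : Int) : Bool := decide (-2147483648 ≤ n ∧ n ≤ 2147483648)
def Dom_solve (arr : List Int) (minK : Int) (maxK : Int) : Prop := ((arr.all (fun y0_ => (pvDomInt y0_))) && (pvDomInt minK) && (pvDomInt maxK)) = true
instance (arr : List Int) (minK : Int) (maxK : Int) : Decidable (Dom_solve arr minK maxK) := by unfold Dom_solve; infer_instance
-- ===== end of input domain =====

-- B replaces A's nested pair loop by a single pass with running prefix aggregates (objective: alternative algorithm).

-- ===== PORT A =====
-- 'for i,num in enumerate(arr)' building min_idxs and max_idxs, both appended in index order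
def idxPair : List Int → Int → Int → Int → List Int × List Int
  | [], _, _, _ => ([], [])
  | x :: xs, i, mk, xk =>
    let rest := idxPair xs (i + 1) mk xk
    ((if x = mk then i :: rest.1 else rest.1), (if x = xk then i :: rest.2 else rest.2))

def solve (arr : List Int) (minK : Int) (maxK : Int) : Int :=
  let n : Int := arr.length
  let p := idxPair arr 0 minK maxK
  if minK = maxK then
    let k : Int := p.1.length
    PySem.Int.floordiv (k * (k + 1)) 2
  else
    p.1.foldl (fun c i =>
      p.2.foldl (fun c j =>
        let left := min i j
        let right := max i j
        c + (left + 1) * (n - right)) c) 0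

-- ===== PORT B =====
-- total_nj = sum(n - j for j, v in enumerate(arr) if v == maxK)
def sumNJ : List Int → Int → Int → Int → Int
  | [], _, _, _ => 0
  | x :: xs, i, xk, n => (if x = xk then n - i else 0) + sumNJ xs (i + 1) xk n

-- the single pass: state (seen_j1, seen_nj, count)
def scanB (mk xk n tj : Int) : List Int → Int → Int → Int → Int → Int
  | [], _, _, _, c => c
  | x :: xs, i, s1, sn, c =>
    if x = xk then scanB mk xk n tj xs (i + 1) (s1 + (i + 1)) (sn + (n - i)) c
    else if x = mk then scanB mk xk n tj xs (i + 1) s1 sn (c + (n - i) * s1 + (i + 1) * (tj - sn))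
    else scanB mk xk n tj xs (i + 1) s1 sn c

def solve_alt (arr : List Int) (minK : Int) (maxK : Int) : Int :=
  let n : Int := arr.length
  if minK = maxK then
    let k : Int := PySem.List.count arr minK
    PySem.Int.floordiv (k * (k + 1)) 2
  else
    scanB minK maxK n (sumNJ arr 0 maxK n) arr 0 0 0 0

-- ===== PRECONDITION & SPEC =====
def Spec_solve (arr : List Int) (minK : Int) (maxK : Int) (out : Int) : Prop := out = solve_alt arr minK maxK
instance (arr : List Int) (minK : Int) (maxK : Int) (out : Int) : Decidable (Spec_solve arr minK maxK out) := by unfold Spec_solve; infer_instance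

-- ===== CLAIM (what is proved, stated in full; the proofs are below) =====
def Claim_equal_solve : Prop := ∀ (arr : List Int) (minK : Int) (maxK : Int), Dom_solve arr minK maxK → Spec_solve arr minK maxK (solve arr minK maxK)

-- ===== LEMMAS AND PROOFS =====

-- index list of positions (from start index i) whose element equals k
def idxList : List Int → Int → Int → List Int
  | [], _, _ => []
  | x :: xs, i, k => if x = k then i :: idxList xs (i + 1) k else idxList xs (i + 1) k

theorem idxPair_fst (xs : List Int) (i mk xk : Int) : (idxPair xs i mk xk).1 = idxList xs i mk := by
  induction xs generalizing i with
  | nil => rfl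
  | cons x t ih => simp [idxPair, idxList, ih]

theorem idxPair_snd (xs : List Int) (i mk xk : Int) : (idxPair xs i mk xk).2 = idxList xs i xk := by
  induction xs generalizing i with
  | nil => rfl
  | cons x t ih => simp [idxPair, idxList, ih]

theorem idxList_length (xs : List Int) (i k : Int) : ((idxList xs i k).length : Int) = PySem.List.count xs k := by
  have H : ∀ (ys : List Int) (i : Int), (idxList ys i k).length = ys.count k := by
    intro ys
    induction ys with
    | nil => intro i; rfl
    | cons x t ih => intro i; by_cases h : x = k <;> simp [idxList, h, ih]
  simp [PySem.List.count, H xs i]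

theorem mem_idxList_le (xs : List Int) (i k a : Int) (h : a ∈ idxList xs i k) : i ≤ a := by
  induction xs generalizing i with
  | nil => simp [idxList] at h
  | cons x t ih =>
    by_cases hx : x = k
    · simp only [idxList, if_pos hx, List.mem_cons] at h
      rcases h with h | h
      · omega
      · have := ih (i + 1) h; omega
    · simp only [idxList, if_neg hx] at h
      have := ih (i + 1) h; omega

theorem mem_idxList_disj (xs : List Int) (i mk xk a : Int)
    (h1 : a ∈ idxList xs i mk) (h2 : a ∈ idxList xs i xk) : mk = xk := by
  induction xs generalizing i with
  | nil => simp [idxList] at h1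
  | cons x t ih =>
    by_cases hm : x = mk <;> by_cases hx : x = xk
    · omega
    · simp only [idxList, if_pos hm, if_neg hx, List.mem_cons] at h1 h2
      rcases h1 with h1 | h1
      · have := mem_idxList_le t (i + 1) xk a h2; omega
      · exact ih (i + 1) h1 h2
    · simp only [idxList, if_neg hm, if_pos hx, List.mem_cons] at h1 h2
      rcases h2 with h2 | h2
      · have := mem_idxList_le t (i + 1) mk a h1; omega
      · exact ih (i + 1) h1 h2
    · simp only [idxList, if_neg hm, if_neg hx] at h1 h2
      exact ih (i + 1) h1 h2

theorem sumNJ_eq (xs : List Int) (i xk n : Int) :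
    sumNJ xs i xk n = ((idxList xs i xk).map (fun j => n - j)).sum := by
  induction xs generalizing i with
  | nil => simp [sumNJ, idxList]
  | cons x t ih => by_cases h : x = xk <;> simp [sumNJ, idxList, h, ih]

-- a double 'for' loop accumulating a sum is the sum over the product
theorem double_foldl_sum (M X : List Int) (n : Int) :
    M.foldl (fun c a => X.foldl (fun c j => c + (min a j + 1) * (n - max a j)) c) 0
      = (M.map (fun a => (X.map (fun j => (min a j + 1) * (n - max a j))).sum)).sum := by
  suffices h : ∀ (M : List Int) (c : Int),
      M.foldl (fun c a => X.foldl (fun c j => c + (min a j + 1) * (n - max a j)) c) c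
        = c + (M.map (fun a => (X.map (fun j => (min a j + 1) * (n - max a j))).sum)).sum by
    rw [h]; ring
  intro M
  induction M with
  | nil => simp
  | cons a t ih =>
    intro c
    have hinner : ∀ (X : List Int) (c : Int),
        X.foldl (fun c j => c + (min a j + 1) * (n - max a j)) c
          = c + (X.map (fun j => (min a j + 1) * (n - max a j))).sum := by
      intro X
      induction X with
      | nil => simp
      | cons x s ihX => intro c; simp [ihX]; ring
    simp only [List.foldl_cons, List.map_cons, List.sum_cons, ih, hinner]
    ring

-- the scan invariant: B's single pass computes the prefix-split pair sum
theorem scanB_inv (mk xk n tj : Int) (hne : mk ≠ xk) (xs : List Int) :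
    ∀ (i s1 sn c : Int),
    scanB mk xk n tj xs i s1 sn c
      = c + ((idxList xs i mk).map (fun a =>
          (n - a) * (s1 + (((idxList xs i xk).filter (fun j => decide (j < a))).map (fun j => j + 1)).sum)
          + (a + 1) * (tj - sn - (((idxList xs i xk).filter (fun j => decide (j < a))).map (fun j => n - j)).sum))).sum := by
  induction xs with
  | nil => intro i s1 sn c; simp [scanB, idxList]
  | cons x t ih =>
    intro i s1 sn c
    by_cases hx : x = xk
    · have hm : x ≠ mk := fun h => hne (h ▸ hx ▸ rfl)
      simp only [scanB, if_pos hx, if_neg hm, idxList, ih]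
      congr 1
      apply congrArg List.sum
      apply List.map_congr_left
      intro a ha
      have hia : i + 1 ≤ a := mem_idxList_le t (i + 1) mk a ha
      have hlt : decide (i < a) = true := by simp; omega
      simp only [List.filter_cons, hlt, if_pos, List.map_cons, List.sum_cons]
      ring
    · by_cases hm : x = mk
      · simp only [scanB, if_neg hx, if_pos hm, idxList, ih, List.map_cons, List.sum_cons]
        have hnil : (idxList t (i + 1) xk).filter (fun j => decide (j < i)) = [] := by
          rw [List.filter_eq_nil_iff]
          intro j hj
          have := mem_idxList_le t (i + 1) xk j hj
          simp; omega
        rw [hnil]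
        simp only [List.map_nil, List.sum_nil]
        ring
      · simp only [scanB, if_neg hx, if_neg hm, idxList, ih]

-- per element of M: the pair sum over X equals the prefix-split form, given a ∉ X
theorem pair_sum_split (n a : Int) (X : List Int) (hne : ∀ j ∈ X, j ≠ a) :
    (X.map (fun j => (min a j + 1) * (n - max a j))).sum
      = (n - a) * (((X.filter (fun j => decide (j < a))).map (fun j => j + 1)).sum)
        + (a + 1) * (((X.map (fun j => n - j)).sum) - ((X.filter (fun j => decide (j < a))).map (fun j => n - j)).sum) := by
  induction X with
  | nil => simp
  | cons j t ih =>
    have hja : j ≠ a := hne j (List.mem_cons_self ..)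
    have iht := ih (fun x hx => hne x (List.mem_cons_of_mem _ hx))
    by_cases h : j < a
    · have h1 : min a j = j := by omega
      have h2 : max a j = a := by omega
      have hd : decide (j < a) = true := by simp [h]
      simp only [List.map_cons, List.sum_cons, List.filter_cons, hd, if_pos, h1, h2, iht]
      ring
    · have h1 : min a j = a := by omega
      have h2 : max a j = j := by omega
      have hd : ¬ (decide (j < a) = true) := by simp; omega
      simp only [List.map_cons, List.sum_cons, List.filter_cons, if_neg hd, h1, h2, iht]
      ring

-- ===== VERDICT (by name: the statement is the Claim_ definition above) =====
theorem solve_spec : Claim_equal_solve := by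
  intro arr mk xk _
  show solve arr mk xk = solve_alt arr mk xk
  by_cases h : mk = xk
  · simp [solve, solve_alt, h, idxPair_fst, idxList_length]
  · simp only [solve, solve_alt, if_neg h, idxPair_fst, idxPair_snd]
    rw [scanB_inv _ _ _ _ h, double_foldl_sum, sumNJ_eq]
    simp only [zero_add, sub_zero]
    congr 1
    apply List.map_congr_left
    intro a ha
    rw [pair_sum_split]
    intro j hj hja
    exact h (mem_idxList_disj arr 0 mk xk a ha (hja ▸ hj))
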